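-- pv_equiv track=rewrite | github.com/mosaicml/streaming | streaming/base/shuffle.py | _divide_spans
-- ===== SOURCE A (Python) =====
-- from typing import List, Tuple
--
-- def _divide_spans(spans: List[Tuple[int, int]], num_samples: int, num_parts: int) -> \
--         Tuple[List[Tuple[int, int]], List[Tuple[int, int]]]:
--     """Divide the spans into discrete, equal sized partitions.
--
--     Don't use ``spans`` after this, as it is modified in-place for performance reasons.
--
--     Args:
--         spans (List[Tuple[int, int]]): List of spans to partition.
--         num_samples (int): Total number of samples across all spans.
--         num_parts (int): Number of groupings to divide spans into.
--
--     Returns: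
--         Tuple[List[Tuple, int, int]], List[Tuple[int, int]]]: Spans and super spans.
--     """
--     begin_part = 0
--     span_index = 0
--     samples_so_far = 0
--
--     out_spans = []
--     super_spans = []
--
--     for part in range(num_parts):
--         part_end = num_samples * (part + 1) // num_parts
--
--         while True:
--             if span_index == len(spans):
--                 break
--
--             span = spans[span_index]
--             samples_this_span = span[1] - span[0]
--             if part_end < samples_so_far + samples_this_span:
--                 if samples_so_far < part_end:
--                     split = part_end - samples_so_far
--                     new_span = span[0], span[0] + split
--                     out_spans.append(new_span)
--                     spans[span_index] = span[0] + split, span[1]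
--                     samples_so_far += split
--                 break
--
--             out_spans.append(span)
--             span_index += 1
--             samples_so_far += samples_this_span
--
--         super_span = begin_part, len(out_spans)
--         super_spans.append(super_span)
--         begin_part = len(out_spans)
--
--     return out_spans, super_spans
-- ===== SOURCE B (Python) =====
-- from itertools import accumulate
--
-- def _divide_spans(spans, num_samples, num_parts):
--     """Prefix-sum / slice formulation; agrees with the original on the return value
--     (it does not mutate ``spans`` in place)."""
--     # S[j] = global sample position at the start of span j
--     S = [0] + list(accumulate(e - b for b, e in spans))
--     n = len(spans)
--     out_spans = []
--     super_spans = []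
--     i = 0          # first span not yet fully emitted
--     sofar = 0      # global sample position reached so far
--     begin = 0
--     for p in range(num_parts):
--         E = num_samples * (p + 1) // num_parts
--         # advance over every span whose global end lies at or before E
--         k = i
--         while k < n and S[k + 1] <= E:
--             k += 1
--         if i < k:
--             # emit spans i..k-1 in one slice; only the first may start mid-span
--             b0, e0 = spans[i]
--             out_spans.append((b0 + (sofar - S[i]), e0))
--             out_spans.extend(spans[i + 1:k])
--             i = k
--             sofar = S[k]
--         if k < n and sofar < E:
--             # partition boundary falls strictly inside span k: emit the head piece
--             b0 = spans[k][0]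
--             out_spans.append((b0 + (sofar - S[k]), b0 + (E - S[k])))
--             sofar = E
--         super_spans.append((begin, len(out_spans)))
--         begin = len(out_spans)
--     return out_spans, super_spans
-- ===== Notes on version B (the rewrite author's own statement) =====
-- stated objective: alternative
-- what changed: A runs a stateful nested loop that mutates spans in place, re-reading the mutated entry to carry the cut cursor; B instead precomputes the prefix-sum table S of span lengths once, and per partition merely advances an index by comparing S[k+1] with the partition end, then emits a whole slice of the ORIGINAL spans plus at most one split piece, mapping global sample positions back to file offsets arithmetically (b_i + pos - S_i) with no mutation and no running per-span state.
import Mathlib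
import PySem

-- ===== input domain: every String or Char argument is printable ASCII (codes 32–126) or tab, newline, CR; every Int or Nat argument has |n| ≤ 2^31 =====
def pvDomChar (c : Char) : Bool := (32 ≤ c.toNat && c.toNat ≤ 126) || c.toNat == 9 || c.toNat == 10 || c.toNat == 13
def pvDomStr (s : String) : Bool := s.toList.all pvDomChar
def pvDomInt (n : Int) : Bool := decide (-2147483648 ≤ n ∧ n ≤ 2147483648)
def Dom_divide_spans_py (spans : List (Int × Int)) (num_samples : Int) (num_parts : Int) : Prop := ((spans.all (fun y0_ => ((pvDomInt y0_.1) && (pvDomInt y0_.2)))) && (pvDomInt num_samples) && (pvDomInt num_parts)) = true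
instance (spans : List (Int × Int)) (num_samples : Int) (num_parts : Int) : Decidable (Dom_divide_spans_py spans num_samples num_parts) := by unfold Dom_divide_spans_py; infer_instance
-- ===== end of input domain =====

-- B replaces A's stateful nested loop (which mutates `spans` in place to carry the cut cursor)
-- by a prefix-sum table plus whole-slice emission with arithmetic offset mapping; the
-- equivalence proved is about the RETURN value only (A mutates its `spans` argument, B does not).

-- ===== PORT A =====
-- A's inner `while True` loop: state (spans, span_index, samples_so_far, out_spans).
def aInner (spans : List (Int × Int)) (span_index : Nat) (samples_so_far : Int)
    (part_end : Int) (out : List (Int × Int)) :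
    List (Int × Int) × Nat × Int × List (Int × Int) :=
  if h : span_index < spans.length then
    let span := spans.getD span_index (0, 0)
    let samples_this_span := span.2 - span.1
    if part_end < samples_so_far + samples_this_span then
      if samples_so_far < part_end then
        let split := part_end - samples_so_far
        (spans.set span_index (span.1 + split, span.2), span_index,
          samples_so_far + split, out ++ [(span.1, span.1 + split)])
      else (spans, span_index, samples_so_far, out)
    else
      aInner spans (span_index + 1) (samples_so_far + samples_this_span) part_end
        (out ++ [span])
  else (spans, span_index, samples_so_far, out)
termination_by spans.length - span_index
decreasing_by omega

-- body of A's `for part in range(num_parts)` loop, with part_end already computed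
def aStepE (st : Int × List (Int × Int) × Nat × Int × List (Int × Int) × List (Int × Int))
    (part_end : Int) :
    Int × List (Int × Int) × Nat × Int × List (Int × Int) × List (Int × Int) :=
  match st with
  | (begin_part, spans, span_index, samples_so_far, out_spans, super_spans) =>
    match aInner spans span_index samples_so_far part_end out_spans with
    | (spans', span_index', samples_so_far', out') =>
      (Int.ofNat out'.length, spans', span_index', samples_so_far', out',
        super_spans ++ [(begin_part, Int.ofNat out'.length)])

def aStep (num_samples num_parts : Int)
    (st : Int × List (Int × Int) × Nat × Int × List (Int × Int) × List (Int × Int))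
    (p : Int) :
    Int × List (Int × Int) × Nat × Int × List (Int × Int) × List (Int × Int) :=
  aStepE st (PySem.Int.floordiv (num_samples * (p + 1)) num_parts)

def divide_spans_py (spans : List (Int × Int)) (num_samples : Int) (num_parts : Int) :
    (List (Int × Int)) × (List (Int × Int)) :=
  let final := (PySem.List.pyRange 0 num_parts 1).foldl (aStep num_samples num_parts)
    (0, spans, 0, 0, [], [])
  (final.2.2.2.2.1, final.2.2.2.2.2)

-- ===== PORT B =====
-- Source B's `while k < n and S[k+1] <= E: k += 1` scan
def bScan (S : List Int) (n : Nat) (E : Int) (k : Nat) : Nat :=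
  if h : k < n ∧ S.getD (k + 1) 0 ≤ E then bScan S n E (k + 1) else k
termination_by n - k
decreasing_by omega

-- body of Source B's `for p in range(num_parts)` loop with E = part end; state (i, sofar, begin, out, sup)
def bStepE (spans : List (Int × Int)) (S : List Int)
    (st : Nat × Int × Int × List (Int × Int) × List (Int × Int)) (E : Int) :
    Nat × Int × Int × List (Int × Int) × List (Int × Int) :=
  match st with
  | (i, sofar, begin_, out, sup) =>
    let k := bScan S spans.length E i
    let t1 :=
      if i < k then
        let sp := spans.getD i (0, 0)
        (k, S.getD k 0,
          out ++ [(sp.1 + (sofar - S.getD i 0), sp.2)]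
              ++ PySem.List.slice spans (some ((i + 1 : Nat) : Int)) (some ((k : Nat) : Int)))
      else (i, sofar, out)
    let t2 :=
      if k < spans.length ∧ t1.2.1 < E then
        let b0 := (spans.getD k (0, 0)).1
        (E, t1.2.2 ++ [(b0 + (t1.2.1 - S.getD k 0), b0 + (E - S.getD k 0))])
      else (t1.2.1, t1.2.2)
    (t1.1, t2.1, Int.ofNat t2.2.length, t2.2, sup ++ [(begin_, Int.ofNat t2.2.length)])

def divide_spans_py_alt (spans : List (Int × Int)) (num_samples : Int) (num_parts : Int) :
    (List (Int × Int)) × (List (Int × Int)) :=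
  -- S = [0] + list(accumulate(e - b for b, e in spans)) : List.scanl is accumulate with initial 0
  let S := List.scanl (fun s sp => s + (sp.2 - sp.1)) 0 spans
  let final := (PySem.List.pyRange 0 num_parts 1).foldl
    (fun st p => bStepE spans S st (PySem.Int.floordiv (num_samples * (p + 1)) num_parts))
    (0, 0, 0, [], [])
  (final.2.2.2.1, final.2.2.2.2)

-- ===== PRECONDITION & SPEC =====
def Spec_divide_spans_py (spans : List (Int × Int)) (num_samples : Int) (num_parts : Int) (out : (List (Int × Int)) × (List (Int × Int))) : Prop := out = divide_spans_py_alt spans num_samples num_parts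
instance (spans : List (Int × Int)) (num_samples : Int) (num_parts : Int) (out : (List (Int × Int)) × (List (Int × Int))) : Decidable (Spec_divide_spans_py spans num_samples num_parts out) := by unfold Spec_divide_spans_py; infer_instance

-- ===== CLAIM (what is proved, stated in full; the proofs are below) =====
def Claim_equal_divide_spans_py : Prop := ∀ (spans : List (Int × Int)) (num_samples : Int) (num_parts : Int), Dom_divide_spans_py spans num_samples num_parts → Spec_divide_spans_py spans num_samples num_parts (divide_spans_py spans num_samples num_parts)

-- ===== LEMMAS AND PROOFS =====

-- abbreviations for B's per-part computation (proof-only)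
def pvK (spans : List (Int × Int)) (S : List Int) (E : Int) (i : Nat) : Nat :=
  bScan S spans.length E i

def pvS1 (spans : List (Int × Int)) (S : List Int) (E : Int) (i : Nat) (sofar : Int) : Int :=
  if i < pvK spans S E i then S.getD (pvK spans S E i) 0 else sofar

def pvO1 (spans : List (Int × Int)) (S : List Int) (E : Int) (i : Nat) (sofar : Int)
    (out : List (Int × Int)) : List (Int × Int) :=
  if i < pvK spans S E i then
    out ++ [((spans.getD i (0, 0)).1 + (sofar - S.getD i 0), (spans.getD i (0, 0)).2)]
        ++ PySem.List.slice spans (some ((i + 1 : Nat) : Int)) (some ((pvK spans S E i : Nat) : Int))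
  else out

def pvS2 (spans : List (Int × Int)) (S : List Int) (E : Int) (i : Nat) (sofar : Int) : Int :=
  if pvK spans S E i < spans.length ∧ pvS1 spans S E i sofar < E then E else pvS1 spans S E i sofar

def pvO2 (spans : List (Int × Int)) (S : List Int) (E : Int) (i : Nat) (sofar : Int)
    (out : List (Int × Int)) : List (Int × Int) :=
  if pvK spans S E i < spans.length ∧ pvS1 spans S E i sofar < E then
    pvO1 spans S E i sofar out ++
      [((spans.getD (pvK spans S E i) (0, 0)).1 + (pvS1 spans S E i sofar - S.getD (pvK spans S E i) 0),
        (spans.getD (pvK spans S E i) (0, 0)).1 + (E - S.getD (pvK spans S E i) 0))]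
  else pvO1 spans S E i sofar out

-- the simulation invariant: A's mutated list agrees with the original except that entry i's
-- begin has been replaced by b_i + (sofar - S_i)
def pvInv (spans spansA : List (Int × Int)) (S : List Int) (i : Nat) (sofar : Int) : Prop :=
  spansA.length = spans.length ∧
  ∀ j, i ≤ j → j < spans.length →
    spansA.getD j (0, 0) =
      if j = i then ((spans.getD j (0, 0)).1 + (sofar - S.getD j 0), (spans.getD j (0, 0)).2)
      else spans.getD j (0, 0)

lemma pv_le_bScan (S : List Int) (n : Nat) (E : Int) :
    ∀ fuel i, n - i ≤ fuel → i ≤ bScan S n E i := by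
  intro fuel
  induction fuel with
  | zero => intro i hf; rw [bScan]; rw [dif_neg (by omega)]
  | succ f ih =>
    intro i hf
    rw [bScan]
    by_cases h : i < n ∧ S.getD (i + 1) 0 ≤ E
    · rw [dif_pos h]; have := ih (i + 1) (by omega); omega
    · rw [dif_neg h]

lemma pv_bScan_le (S : List Int) (n : Nat) (E : Int) :
    ∀ fuel i, n - i ≤ fuel → i ≤ n → bScan S n E i ≤ n := by
  intro fuel
  induction fuel with
  | zero => intro i hf hi; rw [bScan]; rw [dif_neg (by omega)]; omega
  | succ f ih =>
    intro i hf hi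
    rw [bScan]
    by_cases h : i < n ∧ S.getD (i + 1) 0 ≤ E
    · rw [dif_pos h]; exact ih (i + 1) (by omega) (by omega)
    · rw [dif_neg h]; omega

-- head of the prefix-sum list
lemma pvScanl_head (a : Int) (l : List (Int × Int)) :
    (List.scanl (fun s sp => s + (sp.2 - sp.1)) a l).getD 0 0 = a := by
  cases l <;> simp [List.scanl]

-- adjacent step of the prefix-sum list
lemma pvScanl_step :
    ∀ (l : List (Int × Int)) (a : Int) (j : Nat), j < l.length →
      (List.scanl (fun s sp => s + (sp.2 - sp.1)) a l).getD (j + 1) 0 =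
        (List.scanl (fun s sp => s + (sp.2 - sp.1)) a l).getD j 0 +
          ((l.getD j (0, 0)).2 - (l.getD j (0, 0)).1) := by
  intro l
  induction l with
  | nil => intro a j hj; simp at hj
  | cons x xs ih =>
    intro a j hj
    cases j with
    | zero =>
      rw [List.scanl_cons]
      simp only [List.getD_cons_succ, List.getD_cons_zero, pvScanl_head]
    | succ j =>
      rw [List.scanl_cons]
      simp only [List.getD_cons_succ]
      exact ih (a + (x.2 - x.1)) j (by simpa using hj)

-- the core simulation: one part of A (its inner while-loop) computes exactly B's
-- scan-plus-slice emission, preserving the invariant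
lemma pvInner (spans : List (Int × Int)) (S : List Int)
    (hS : ∀ j, j < spans.length →
      S.getD (j + 1) 0 = S.getD j 0 + ((spans.getD j (0, 0)).2 - (spans.getD j (0, 0)).1))
    (E : Int) :
    ∀ fuel i spansA sofar out, spans.length - i ≤ fuel → i ≤ spans.length →
      pvInv spans spansA S i sofar →
      ∃ spansA',
        aInner spansA i sofar E out =
          (spansA', pvK spans S E i, pvS2 spans S E i sofar, pvO2 spans S E i sofar out) ∧
        pvInv spans spansA' S (pvK spans S E i) (pvS2 spans S E i sofar) := by
  intro fuel
  induction fuel with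
  | zero =>
    intro i spansA sofar out hf hi hInv
    have hin : i = spans.length := by omega
    refine ⟨spansA, ?_, ?_⟩
    · have hk : pvK spans S E i = i := by
        unfold pvK; rw [bScan]; rw [dif_neg (by omega)]
      rw [aInner]
      rw [dif_neg (by rw [hInv.1]; omega)]
      have h1 : pvS1 spans S E i sofar = sofar := by unfold pvS1; rw [hk]; simp
      have ho1 : pvO1 spans S E i sofar out = out := by unfold pvO1; rw [hk]; simp
      have h2 : pvS2 spans S E i sofar = sofar := by
        unfold pvS2; rw [hk, h1]; rw [if_neg (by omega)]
      have ho2 : pvO2 spans S E i sofar out = out := by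
        unfold pvO2; rw [hk, h1, ho1]; rw [if_neg (by omega)]
      rw [hk, h2, ho2]
    · have hk : pvK spans S E i = i := by
        unfold pvK; rw [bScan]; rw [dif_neg (by omega)]
      have h1 : pvS1 spans S E i sofar = sofar := by unfold pvS1; rw [hk]; simp
      have h2 : pvS2 spans S E i sofar = sofar := by
        unfold pvS2; rw [hk, h1]; rw [if_neg (by omega)]
      rw [hk, h2]; exact hInv
  | succ f ih =>
    intro i spansA sofar out hf hi hInv
    obtain ⟨hlen, hag⟩ := hInv
    by_cases hin : i < spans.length
    · have hAi : spansA.getD i (0, 0) =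
          ((spans.getD i (0, 0)).1 + (sofar - S.getD i 0), (spans.getD i (0, 0)).2) := by
        have := hag i le_rfl hin; rwa [if_pos rfl] at this
      have hsum : sofar + ((spans.getD i (0, 0)).2 -
          ((spans.getD i (0, 0)).1 + (sofar - S.getD i 0))) = S.getD (i + 1) 0 := by
        rw [hS i hin]; ring
      by_cases hcons : S.getD (i + 1) 0 ≤ E
      · -- consume span i entirely
        have hk : pvK spans S E i = pvK spans S E (i + 1) := by
          unfold pvK; conv_lhs => rw [bScan]
          rw [dif_pos ⟨hin, hcons⟩]
        have hki : i + 1 ≤ pvK spans S E (i + 1) :=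
          pv_le_bScan S spans.length E (spans.length - (i + 1)) (i + 1) le_rfl
        have hkn : pvK spans S E (i + 1) ≤ spans.length :=
          pv_bScan_le S spans.length E (spans.length - (i + 1)) (i + 1) le_rfl (by omega)
        -- A takes one inner step
        have hstep : aInner spansA i sofar E out =
            aInner spansA (i + 1) (S.getD (i + 1) 0) E
              (out ++ [((spans.getD i (0, 0)).1 + (sofar - S.getD i 0), (spans.getD i (0, 0)).2)]) := by
          conv_lhs => rw [aInner]
          rw [dif_pos (by omega : i < spansA.length), hAi]
          simp only
          rw [if_neg (by omega), hsum]
        have hInv' : pvInv spans spansA S (i + 1) (S.getD (i + 1) 0) := by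
          refine ⟨hlen, ?_⟩
          intro j hij hj
          have h2 := hag j (by omega) hj
          rw [if_neg (by omega : j ≠ i)] at h2
          by_cases hji : j = i + 1
          · subst hji; rw [if_pos rfl, h2]
            have : S.getD (i + 1) 0 - S.getD (i + 1) 0 = 0 := by ring
            rw [this]; simp
          · rw [if_neg hji]; exact h2
        obtain ⟨spansA', hEq, hInvF⟩ := ih (i + 1) spansA (S.getD (i + 1) 0)
          (out ++ [((spans.getD i (0, 0)).1 + (sofar - S.getD i 0), (spans.getD i (0, 0)).2)])
          (by omega) (by omega) hInv'
        have hS1 : pvS1 spans S E i sofar = pvS1 spans S E (i + 1) (S.getD (i + 1) 0) := by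
          unfold pvS1
          rw [← hk] at hki ⊢
          rw [if_pos (by omega)]
          by_cases h : i + 1 < pvK spans S E i
          · rw [if_pos h]
          · rw [if_neg h]
            have : pvK spans S E i = i + 1 := by omega
            rw [this]
        have hS2 : pvS2 spans S E i sofar = pvS2 spans S E (i + 1) (S.getD (i + 1) 0) := by
          unfold pvS2
          rw [hk, hS1]
        refine ⟨spansA', ?_, ?_⟩
        · rw [hstep, hEq]
          have hO1 : pvO1 spans S E i sofar out =
              pvO1 spans S E (i + 1) (S.getD (i + 1) 0)
                (out ++ [((spans.getD i (0, 0)).1 + (sofar - S.getD i 0), (spans.getD i (0, 0)).2)]) := by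
            unfold pvO1
            rw [← hk] at hki hkn ⊢
            rw [if_pos (by omega)]
            by_cases h : i + 1 < pvK spans S E i
            · rw [if_pos h]
              -- slice spans (i+1) k = spans[i+1] :: slice spans (i+2) k
              rw [PySem.List.slice_natCast, PySem.List.slice_natCast]
              have hdrop : spans.drop (i + 1) = spans.getD (i + 1) (0, 0) :: spans.drop (i + 2) := by
                rw [List.getD_eq_getElem _ _ (by omega)]
                exact List.drop_eq_getElem_cons (by omega)
              rw [hdrop]
              have htake : pvK spans S E i - (i + 1) = (pvK spans S E i - (i + 2)) + 1 := by omega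
              rw [htake, List.take_succ_cons]
              have hz : S.getD (i + 1) 0 - S.getD (i + 1) 0 = 0 := by ring
              rw [hz]
              simp [List.append_assoc]
            · rw [if_neg h]
              have hki1 : pvK spans S E i = i + 1 := by omega
              rw [hki1, PySem.List.slice_natCast]
              simp
          unfold pvO2
          rw [hS2]
          unfold pvS2
          rw [hk, hS1, hO1]
        · rw [hk, hS2]
          exact hInvF
      · -- partition boundary falls inside (or before) span i: k = i
        have hk : pvK spans S E i = i := by
          unfold pvK; rw [bScan]; rw [dif_neg (by push_neg; intro _; omega)]
        have hgt : E < sofar + ((spans.getD i (0, 0)).2 -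
            ((spans.getD i (0, 0)).1 + (sofar - S.getD i 0))) := by omega
        have h1 : pvS1 spans S E i sofar = sofar := by unfold pvS1; rw [hk]; simp
        have ho1 : pvO1 spans S E i sofar out = out := by unfold pvO1; rw [hk]; simp
        by_cases hsf : sofar < E
        · -- split span i
          refine ⟨spansA.set i ((spans.getD i (0, 0)).1 + (sofar - S.getD i 0) + (E - sofar),
              (spans.getD i (0, 0)).2), ?_, ?_⟩
          · rw [aInner]
            rw [dif_pos (by omega : i < spansA.length), hAi]
            simp only
            rw [if_pos hgt, if_pos hsf]
            have h2 : pvS2 spans S E i sofar = E := by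
              unfold pvS2; rw [hk, h1]; rw [if_pos ⟨hin, hsf⟩]
            have ho2 : pvO2 spans S E i sofar out =
                out ++ [((spans.getD i (0, 0)).1 + (sofar - S.getD i 0),
                  (spans.getD i (0, 0)).1 + (E - S.getD i 0))] := by
              unfold pvO2; rw [hk, h1, ho1]; rw [if_pos ⟨hin, hsf⟩]
            rw [hk, h2, ho2]
            have e1 : sofar + (E - sofar) = E := by ring
            have e2 : (spans.getD i (0, 0)).1 + (sofar - S.getD i 0) + (E - sofar) =
                (spans.getD i (0, 0)).1 + (E - S.getD i 0) := by ring
            rw [e1, e2]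
          · have h2 : pvS2 spans S E i sofar = E := by
              unfold pvS2; rw [hk, h1]; rw [if_pos ⟨hin, hsf⟩]
            rw [hk, h2]
            refine ⟨by simpa using hlen, ?_⟩
            intro j hij hj
            by_cases hji : j = i
            · subst hji
              rw [if_pos rfl]
              have e2 : (spans.getD j (0, 0)).1 + (sofar - S.getD j 0) + (E - sofar) =
                  (spans.getD j (0, 0)).1 + (E - S.getD j 0) := by ring
              rw [← e2]
              simp [List.getD_eq_getElem?_getD, (by omega : j < spansA.length)]
            · rw [if_neg hji]
              have h2 := hag j hij hj
              rw [if_neg hji] at h2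
              rw [← h2]
              simp [List.getD_eq_getElem?_getD, List.getElem?_set_ne, Ne.symm hji]
        · -- no split: part closes with nothing emitted
          have h2 : pvS2 spans S E i sofar = sofar := by
            unfold pvS2; rw [hk, h1]; rw [if_neg (by push_neg; intro _; omega)]
          have ho2 : pvO2 spans S E i sofar out = out := by
            unfold pvO2; rw [hk, h1, ho1]; rw [if_neg (by push_neg; intro _; omega)]
          refine ⟨spansA, ?_, ?_⟩
          · rw [aInner]
            rw [dif_pos (by omega : i < spansA.length), hAi]
            simp only
            rw [if_pos hgt, if_neg hsf, hk, h2, ho2]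
          · rw [hk, h2]; exact ⟨hlen, hag⟩
    · -- i = spans.length: nothing left
      have hin' : i = spans.length := by omega
      have hk : pvK spans S E i = i := by
        unfold pvK; rw [bScan]; rw [dif_neg (by omega)]
      have h1 : pvS1 spans S E i sofar = sofar := by unfold pvS1; rw [hk]; simp
      have ho1 : pvO1 spans S E i sofar out = out := by unfold pvO1; rw [hk]; simp
      have h2 : pvS2 spans S E i sofar = sofar := by
        unfold pvS2; rw [hk, h1]; rw [if_neg (by omega)]
      have ho2 : pvO2 spans S E i sofar out = out := by
        unfold pvO2; rw [hk, h1, ho1]; rw [if_neg (by omega)]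
      refine ⟨spansA, ?_, ?_⟩
      · rw [aInner]
        rw [dif_neg (by rw [hlen]; omega), hk, h2, ho2]
      · rw [hk, h2]; exact ⟨hlen, hag⟩

-- B's per-part step in terms of the abbreviations
lemma pvBStep_eq (spans : List (Int × Int)) (S : List Int) (E : Int)
    (i : Nat) (sofar b : Int) (out sup : List (Int × Int)) (hi : i ≤ spans.length) :
    bStepE spans S (i, sofar, b, out, sup) E =
      (pvK spans S E i, pvS2 spans S E i sofar, Int.ofNat (pvO2 spans S E i sofar out).length,
        pvO2 spans S E i sofar out,
        sup ++ [(b, Int.ofNat (pvO2 spans S E i sofar out).length)]) := by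
  have hki : i ≤ pvK spans S E i :=
    pv_le_bScan S spans.length E (spans.length - i) i le_rfl
  simp only [bStepE, pvK, pvS2, pvS1, pvO2, pvO1]
  by_cases h : i < bScan S spans.length E i
  · simp only [if_pos h]
    by_cases h2 : bScan S spans.length E i < spans.length ∧ S.getD (bScan S spans.length E i) 0 < E
    · simp only [if_pos h2]
    · simp only [if_neg h2]
  · have hEqk : bScan S spans.length E i = i := by unfold pvK at hki; omega
    simp only [if_neg h, hEqk, if_neg (lt_irrefl i)]
    by_cases h2 : i < spans.length ∧ sofar < E
    · simp only [if_pos h2]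
    · simp only [if_neg h2]

-- the outer loop: A's fold over part ends matches B's
lemma pvOuter (spans : List (Int × Int)) (S : List Int)
    (hS : ∀ j, j < spans.length →
      S.getD (j + 1) 0 = S.getD j 0 + ((spans.getD j (0, 0)).2 - (spans.getD j (0, 0)).1)) :
    ∀ (es : List Int) (spansA : List (Int × Int)) (i : Nat) (sofar b : Int)
      (out sup : List (Int × Int)), i ≤ spans.length → pvInv spans spansA S i sofar →
      ((es.foldl aStepE (b, spansA, i, sofar, out, sup)).2.2.2.2.1,
       (es.foldl aStepE (b, spansA, i, sofar, out, sup)).2.2.2.2.2)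
        = ((es.foldl (bStepE spans S) (i, sofar, b, out, sup)).2.2.2.1,
           (es.foldl (bStepE spans S) (i, sofar, b, out, sup)).2.2.2.2) := by
  intro es
  induction es with
  | nil => intro spansA i sofar b out sup hi hInv; simp
  | cons E es ih =>
    intro spansA i sofar b out sup hi hInv
    obtain ⟨spansA', hEq, hInvF⟩ :=
      pvInner spans S hS E (spans.length - i) i spansA sofar out le_rfl hi hInv
    have hkn : pvK spans S E i ≤ spans.length :=
      pv_bScan_le S spans.length E (spans.length - i) i le_rfl hi
    have hA : aStepE (b, spansA, i, sofar, out, sup) E =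
        (Int.ofNat (pvO2 spans S E i sofar out).length, spansA', pvK spans S E i,
          pvS2 spans S E i sofar, pvO2 spans S E i sofar out,
          sup ++ [(b, Int.ofNat (pvO2 spans S E i sofar out).length)]) := by
      simp only [aStepE, hEq]
    simp only [List.foldl_cons, hA, pvBStep_eq spans S E i sofar b out sup hi]
    exact ih spansA' (pvK spans S E i) (pvS2 spans S E i sofar)
      (Int.ofNat (pvO2 spans S E i sofar out).length) (pvO2 spans S E i sofar out)
      (sup ++ [(b, Int.ofNat (pvO2 spans S E i sofar out).length)]) hkn hInvF

theorem pv_top (spans : List (Int × Int)) (num_samples num_parts : Int) :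
    divide_spans_py spans num_samples num_parts
      = divide_spans_py_alt spans num_samples num_parts := by
  unfold divide_spans_py divide_spans_py_alt
  have hS : ∀ j, j < spans.length →
      (List.scanl (fun s sp => s + (sp.2 - sp.1)) 0 spans).getD (j + 1) 0 =
        (List.scanl (fun s sp => s + (sp.2 - sp.1)) 0 spans).getD j 0 +
          ((spans.getD j (0, 0)).2 - (spans.getD j (0, 0)).1) := by
    intro j hj; exact pvScanl_step spans 0 j hj
  have hInv0 : pvInv spans spans (List.scanl (fun s sp => s + (sp.2 - sp.1)) 0 spans) 0 0 := by
    refine ⟨rfl, ?_⟩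
    intro j h0 hj
    by_cases hj0 : j = 0
    · subst hj0
      rw [if_pos rfl, pvScanl_head]
      have : (spans.getD 0 (0, 0)).1 + (0 - 0) = (spans.getD 0 (0, 0)).1 := by ring
      rw [this]
    · rw [if_neg hj0]
  have h := pvOuter spans (List.scanl (fun s sp => s + (sp.2 - sp.1)) 0 spans) hS
    ((PySem.List.pyRange 0 num_parts 1).map
      (fun p => PySem.Int.floordiv (num_samples * (p + 1)) num_parts))
    spans 0 0 0 [] [] (by omega) hInv0
  rw [List.foldl_map, List.foldl_map] at h
  exact h

-- ===== VERDICT (by name: the statement is the Claim_ definition above) =====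
theorem divide_spans_py_spec : Claim_equal_divide_spans_py := by
  intro spans ns np _
  unfold Spec_divide_spans_py
  exact pv_top spans ns np
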